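-- pv_equiv track=rewrite | github.com/lmarte17/athena | backend/adk-bidi/app/context_builder.py | _format_live_context
-- ===== SOURCE A (Python) =====
-- _MAX_LIVE_CONTEXT_CHARS = 1200
--
-- def _format_live_context(items: dict[str, str]) -> str:
--     if not items:
--         return ""
--     rendered: list[str] = []
--     total_chars = 0
--     for label, content in reversed(list(items.items())):
--         section = f"### {label}\n{content}"
--         if rendered and total_chars + len(section) > _MAX_LIVE_CONTEXT_CHARS:
--             break
--         rendered.append(section)
--         total_chars += len(section)
--     if not rendered:
--         return ""
--     rendered.reverse()
--     body = "\n\n".join(rendered)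
--     return (
--         "## Fresh live context loaded during this session\n\n"
--         "Treat this as the freshest external source of truth for the current conversation.\n\n"
--         f"{body}"
--     )
-- ===== SOURCE B (Python) =====
-- _MAX_LIVE_CONTEXT_CHARS = 1200
--
-- def _format_live_context(items: dict[str, str]) -> str:
--     pairs = list(items.items())
--     if not pairs:
--         return ""
--     # each rendered section is "### {label}\n{content}": len = len(label) + len(content) + 5
--     lens = [len(label) + len(content) + 5 for label, content in pairs]
--     total = sum(lens)
--     start = 0
--     # drop oldest items from the front while the remainder is over the cap,
--     # always keeping at least the newest item
--     while len(pairs) - start > 1 and total > _MAX_LIVE_CONTEXT_CHARS: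
--         total -= lens[start]
--         start += 1
--     body = "\n\n".join(f"### {label}\n{content}" for label, content in pairs[start:])
--     return (
--         "## Fresh live context loaded during this session\n\n"
--         "Treat this as the freshest external source of truth for the current conversation.\n\n"
--         + body
--     )
-- ===== Notes on version B (the rewrite author's own statement) =====
-- stated objective: alternative
-- what changed: A builds the kept sections newest-first with a running char total and breaks when the next section would exceed the cap; B instead computes all section lengths and their grand total once, then drops items from the FRONT (oldest first), subtracting each dropped length from the total until it fits under the cap (always keeping the newest item), and renders only the surviving suffix in one forward join with no list reversal. Correct because section lengths are positive, so A's first-exceed break keeps exactly the maximal suffix fitting the cap.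
import Mathlib
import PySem

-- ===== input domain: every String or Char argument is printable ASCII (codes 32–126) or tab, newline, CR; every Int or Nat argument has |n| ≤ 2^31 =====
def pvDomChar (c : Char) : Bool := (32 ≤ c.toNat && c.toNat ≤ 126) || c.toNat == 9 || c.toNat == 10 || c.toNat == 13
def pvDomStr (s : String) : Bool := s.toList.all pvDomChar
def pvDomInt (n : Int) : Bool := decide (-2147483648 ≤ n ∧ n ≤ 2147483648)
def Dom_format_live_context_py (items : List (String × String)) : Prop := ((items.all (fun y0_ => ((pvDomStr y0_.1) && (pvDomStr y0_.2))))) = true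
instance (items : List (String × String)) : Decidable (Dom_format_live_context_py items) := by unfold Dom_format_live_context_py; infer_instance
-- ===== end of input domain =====

-- B replaces A's newest-first build-while-testing loop (accumulate sections until the
-- next would exceed the cap, then reverse) with the opposite traversal: compute the grand
-- total of all section lengths once, drop items from the FRONT while the remainder is
-- over the cap (keeping at least the last item), and join the surviving suffix forward.
-- Objective: alternative decomposition; not faster.

-- ===== PORT A =====

-- the loop: 'for label, content in reversed(list(items.items())): …' with break
def pvLoopA : List (String × String) → List String → Int → List String
  | [], rendered, _ => rendered
  | (label, content) :: rest, rendered, total =>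
      let sec := "### " ++ label ++ "\n" ++ content
      if rendered ≠ [] ∧ total + PySem.Str.len sec > 1200 then rendered
      else pvLoopA rest (rendered ++ [sec]) (total + PySem.Str.len sec)

def format_live_context_py (items : List (String × String)) : String :=
  if items = [] then ""
  else
    let rendered := pvLoopA items.reverse [] 0
    if rendered = [] then ""
    else
      let body := PySem.Str.join "\n\n" rendered.reverse
      "## Fresh live context loaded during this session\n\n" ++
      "Treat this as the freshest external source of truth for the current conversation.\n\n" ++
      body

-- ===== PORT B =====

-- 'while len(pairs) - start > 1 and total > _MAX_LIVE_CONTEXT_CHARS: total -= lens[start]; start += 1'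
-- (recursion walks down the lens list exactly as the index walks forward)
def pvStartB : List Int → Int → Nat
  | [], _ => 0
  | l :: ls, total => if ls ≠ [] ∧ total > 1200 then 1 + pvStartB ls (total - l) else 0

def format_live_context_py_alt (items : List (String × String)) : String :=
  if items = [] then ""
  else
    let lens := items.map (fun lc => PySem.Str.len lc.1 + PySem.Str.len lc.2 + 5)
    let start := pvStartB lens lens.sum
    let body := PySem.Str.join "\n\n"
      ((items.drop start).map (fun lc => "### " ++ lc.1 ++ "\n" ++ lc.2))
    "## Fresh live context loaded during this session\n\n" ++
    "Treat this as the freshest external source of truth for the current conversation.\n\n" ++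
    body

-- ===== PRECONDITION & SPEC =====
def Spec_format_live_context_py (items : List (String × String)) (out : String) : Prop := out = format_live_context_py_alt items
instance (items : List (String × String)) (out : String) : Decidable (Spec_format_live_context_py items out) := by unfold Spec_format_live_context_py; infer_instance

-- ===== CLAIM =====
def Claim_equal_format_live_context_py : Prop := ∀ (items : List (String × String)), Dom_format_live_context_py items → Spec_format_live_context_py items (format_live_context_py items)

-- ===== LEMMAS AND PROOFS =====

-- section renderer
def pvSec (lc : String × String) : String := "### " ++ lc.1 ++ "\n" ++ lc.2

-- take sections while the running total stays within the cap (A's loop after the forced first)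
def pvTW (t : Int) : List String → List String
  | [] => []
  | s :: ss => if t + PySem.Str.len s > 1200 then [] else s :: pvTW (t + PySem.Str.len s) ss

-- A's kept list (reversed order): first element forced, then pvTW
def pvAK : List String → List String
  | [] => []
  | r :: rs => r :: pvTW (PySem.Str.len r) rs

theorem pvLoopA_ne_nil (ps : List (String × String)) (r : List String) (t : Int)
    (h : r ≠ []) : pvLoopA ps r t = r ++ pvTW t (ps.map pvSec) := by
  induction ps generalizing r t with
  | nil => simp [pvLoopA, pvTW]
  | cons p rest ih =>
      obtain ⟨l, c⟩ := p
      simp only [pvLoopA, List.map_cons, pvTW, pvSec]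
      by_cases hc : t + PySem.Str.len ("### " ++ l ++ "\n" ++ c) > 1200
      · rw [if_pos ⟨h, hc⟩, if_pos hc]; simp
      · rw [if_neg (by tauto), if_neg hc, ih _ _ (by simp)]; simp

theorem pvLoopA_eq_pvAK (ps : List (String × String)) :
    pvLoopA ps [] 0 = pvAK (ps.map pvSec) := by
  cases ps with
  | nil => simp [pvLoopA, pvAK]
  | cons p rest =>
      obtain ⟨l, c⟩ := p
      simp only [pvLoopA, List.map_cons, pvAK, pvSec]
      rw [if_neg (by simp), pvLoopA_ne_nil _ _ _ (by simp)]
      simp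

theorem pvLen_nonneg (s : String) : 0 ≤ PySem.Str.len s := by
  simp [PySem.Str.len_eq]

theorem pvSum_len_nonneg (l : List String) : 0 ≤ (l.map PySem.Str.len).sum := by
  induction l with
  | nil => simp
  | cons s ss ih => simpa using add_nonneg (pvLen_nonneg s) ih

theorem pvTW_all (t : Int) (l : List String) (h : t + (l.map PySem.Str.len).sum ≤ 1200) :
    pvTW t l = l := by
  induction l generalizing t with
  | nil => simp [pvTW]
  | cons s ss ih =>
      simp only [List.map_cons, List.sum_cons] at h
      have hs := pvSum_len_nonneg ss
      simp only [pvTW]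
      rw [if_neg (by omega), ih _ (by omega)]

theorem pvTW_append (t : Int) (l1 l2 : List String) :
    pvTW t (l1 ++ l2) =
      if pvTW t l1 = l1 then l1 ++ pvTW (t + (l1.map PySem.Str.len).sum) l2
      else pvTW t l1 := by
  induction l1 generalizing t with
  | nil => simp [pvTW]
  | cons s ss ih =>
      simp only [List.cons_append, pvTW, List.map_cons, List.sum_cons]
      by_cases hc : t + PySem.Str.len s > 1200
      · rw [if_pos hc, if_pos hc, if_neg (by simp)]
      · rw [if_neg hc, if_neg hc, ih]
        by_cases hin : pvTW (t + PySem.Str.len s) ss = ss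
        · rw [if_pos hin, if_pos (by rw [hin])]
          simp [add_assoc]
        · rw [if_neg hin, if_neg (by intro h; exact hin (by injection h))]

theorem pvSec_len (lc : String × String) :
    PySem.Str.len (pvSec lc) = PySem.Str.len lc.1 + PySem.Str.len lc.2 + 5 := by
  simp [pvSec, PySem.Str.len_eq]
  omega

-- core: A's kept list (over reversed sections) is the reverse of B's surviving suffix
theorem pvAK_rev (ss : List String) (h : ss ≠ []) :
    pvAK ss.reverse =
      (ss.drop (pvStartB (ss.map PySem.Str.len) (ss.map PySem.Str.len).sum)).reverse := by
  induction ss with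
  | nil => exact absurd rfl h
  | cons s rest ih =>
      cases hr : rest with
      | nil => simp [pvAK, pvTW, pvStartB]
      | cons r0 rest0 =>
          have hrest : rest ≠ [] := by rw [hr]; simp
          rw [← hr]
          simp only [List.map_cons, List.sum_cons, pvStartB]
          have hlsne : rest.map PySem.Str.len ≠ [] := by
            simp [hr]
          by_cases hc : PySem.Str.len s + (rest.map PySem.Str.len).sum > 1200
          · rw [if_pos ⟨hlsne, hc⟩]
            have harith : PySem.Str.len s + (rest.map PySem.Str.len).sum - PySem.Str.len s
                = (rest.map PySem.Str.len).sum := by ring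
            rw [harith]
            -- LHS: (s :: rest).reverse = rest.reverse ++ [s]
            obtain ⟨r, rs, hrr⟩ := List.exists_cons_of_ne_nil
              (show rest.reverse ≠ [] by simpa using hrest)
            have hsum_rr : PySem.Str.len r + (rs.map PySem.Str.len).sum
                = (rest.map PySem.Str.len).sum := by
              have hx : ((rest.reverse).map PySem.Str.len).sum = (rest.map PySem.Str.len).sum := by
                rw [List.map_reverse, List.sum_reverse]
              rw [hrr] at hx
              simpa using hx
            have hLHS : pvAK ((s :: rest).reverse) = pvAK rest.reverse := by
              rw [List.reverse_cons, hrr, List.cons_append]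
              simp only [pvAK, pvTW_append]
              by_cases hin : pvTW (PySem.Str.len r) rs = rs
              · rw [if_pos hin, hin]
                have : pvTW (PySem.Str.len r + (rs.map PySem.Str.len).sum) [s] = [] := by
                  simp only [pvTW]
                  rw [if_pos (by rw [hsum_rr]; omega)]
                rw [this]; simp
              · rw [if_neg hin]
            rw [hLHS, hrr, ← hrr, ih hrest]
            have : List.drop (1 + pvStartB (rest.map PySem.Str.len) ((rest.map PySem.Str.len).sum))
                (s :: rest) = List.drop (pvStartB (rest.map PySem.Str.len) ((rest.map PySem.Str.len).sum)) rest := by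
              rw [Nat.add_comm, List.drop_succ_cons]
            rw [this]
          · rw [if_neg (by tauto), List.drop_zero]
            obtain ⟨r, rs, hrr⟩ := List.exists_cons_of_ne_nil
              (show (s :: rest).reverse ≠ [] by simp)
            have hsum : PySem.Str.len r + (rs.map PySem.Str.len).sum
                = PySem.Str.len s + (rest.map PySem.Str.len).sum := by
              have hx : (((s :: rest).reverse).map PySem.Str.len).sum
                  = ((s :: rest).map PySem.Str.len).sum := by
                rw [List.map_reverse, List.sum_reverse]
              rw [hrr] at hx
              simpa using hx
            rw [hrr]
            simp only [pvAK]
            rw [pvTW_all _ _ (by omega), ← hrr]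

-- ===== VERDICT =====
theorem format_live_context_py_spec : Claim_equal_format_live_context_py := by
  intro items _
  unfold Spec_format_live_context_py format_live_context_py format_live_context_py_alt
  by_cases h : items = []
  · subst h; simp
  · rw [if_neg h, if_neg h]
    have hss : items.map pvSec ≠ [] := by simpa using h
    have hlens : items.map (fun lc => PySem.Str.len lc.1 + PySem.Str.len lc.2 + 5)
        = (items.map pvSec).map PySem.Str.len := by
      rw [List.map_map]
      exact List.map_congr_left (fun lc _ => (pvSec_len lc).symm)
    have hkey : pvLoopA items.reverse [] 0 =
        ((items.map pvSec).drop (pvStartB ((items.map pvSec).map PySem.Str.len)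
          ((items.map pvSec).map PySem.Str.len).sum)).reverse := by
      rw [pvLoopA_eq_pvAK, List.map_reverse]
      exact pvAK_rev _ hss
    have hne : pvLoopA items.reverse [] 0 ≠ [] := by
      rw [pvLoopA_eq_pvAK]
      obtain ⟨x, xs, hx⟩ := List.exists_cons_of_ne_nil (show items.reverse.map pvSec ≠ [] by simpa using h)
      rw [hx]; simp [pvAK]
    rw [if_neg hne, hkey]
    simp only [List.reverse_reverse, hlens, ← List.map_drop]
    rfl
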